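-- pv_equiv track=rewrite | github.com/quattie528/pylibq | xz/qldic.py | uniq4ldic
-- ===== SOURCE A (Python) =====
-- def uniq4ldic(ldic,key,wert_in_front=True):
-- 	res = []
-- 	if wert_in_front == True: ldic.reverse()
-- 	for dic in ldic:
-- 		if res == []:
-- 			res.append(dic)
-- 		else:
-- 			x = dic[key]
-- 			y = res[-1][key]
-- 			if x == y: res.pop()
-- 			res.append(dic)
-- 	if wert_in_front == True: res.reverse()
-- 	return res
-- ===== SOURCE B (Python) =====
-- def uniq4ldic(ldic, key, wert_in_front=True):
--     # Like A, mutates ldic in place (reverse) when wert_in_front == True.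
--     if wert_in_front == True: ldic.reverse()
--     res = [a for a, b in zip(ldic, ldic[1:]) if a[key] != b[key]]
--     if ldic: res.append(ldic[-1])
--     if wert_in_front == True: res.reverse()
--     return res
-- ===== Notes on version B (the rewrite author's own statement) =====
-- stated objective: simpler
-- what changed: Replaces A's accumulator loop with pop/append (a stack keeping the last of each run) by a single zip-with-successor comprehension that keeps an element iff its key value differs from its successor's, plus the final element.
import Mathlib
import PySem

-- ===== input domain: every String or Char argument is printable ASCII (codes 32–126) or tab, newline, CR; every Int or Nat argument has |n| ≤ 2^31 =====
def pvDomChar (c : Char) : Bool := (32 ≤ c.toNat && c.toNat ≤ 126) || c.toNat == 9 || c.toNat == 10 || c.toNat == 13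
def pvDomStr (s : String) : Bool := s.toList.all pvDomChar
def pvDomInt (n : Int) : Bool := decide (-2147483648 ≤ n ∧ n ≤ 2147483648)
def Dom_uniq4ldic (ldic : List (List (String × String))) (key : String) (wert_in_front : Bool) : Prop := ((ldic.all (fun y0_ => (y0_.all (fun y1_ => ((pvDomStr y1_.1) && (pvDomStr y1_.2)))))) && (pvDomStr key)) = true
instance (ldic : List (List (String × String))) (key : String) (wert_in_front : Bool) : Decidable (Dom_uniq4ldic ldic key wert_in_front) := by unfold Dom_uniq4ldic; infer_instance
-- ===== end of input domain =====

-- B replaces A's stack-with-pop loop by a zip-with-successor comprehension (objective: simpler).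
-- Both Pythons reverse ldic IN PLACE when wert_in_front is True; the equivalence proved is about the return value.

-- ===== PORT A =====
-- A's loop body: dic[key] is first-match lookup; the .getD "" default is never reached under Pre_ (key present)
def pvStep (key : String) (res : List (List (String × String))) (dic : List (String × String)) : List (List (String × String)) :=
  if res = [] then res ++ [dic]
  else
    let x := (dic.lookup key).getD ""
    let y := ((PySem.List.pyGetD res (-1) []).lookup key).getD ""
    let res := if x = y then res.dropLast else res
    res ++ [dic]

def uniq4ldic (ldic : List (List (String × String))) (key : String) (wert_in_front : Bool) : List (List (String × String)) :=
  let l := if wert_in_front then ldic.reverse else ldic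
  let res := l.foldl (pvStep key) []
  if wert_in_front then res.reverse else res

-- ===== PORT B =====
-- B's comprehension filter: keep a iff a[key] != b[key] for the successor b
def pvKeep (key : String) (ab : (List (String × String)) × (List (String × String))) : Option (List (String × String)) :=
  if (ab.1.lookup key).getD "" ≠ (ab.2.lookup key).getD "" then some ab.1 else none

def uniq4ldic_alt (ldic : List (List (String × String))) (key : String) (wert_in_front : Bool) : List (List (String × String)) :=
  let l := if wert_in_front then ldic.reverse else ldic
  let res := (l.zip (PySem.List.slice l (some 1) none)).filterMap (pvKeep key)
  let res := if l ≠ [] then res ++ [PySem.List.pyGetD l (-1) []] else res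
  if wert_in_front then res.reverse else res

-- ===== PRECONDITION & SPEC =====
-- Pre_ excludes exactly the inputs where Python A raises KeyError: a list of length ≥ 2
-- in which some element lacks the key (with 0 or 1 elements neither program touches the key).
def Pre_uniq4ldic (ldic : List (List (String × String))) (key : String) (wert_in_front : Bool) : Prop :=
  ldic.length ≤ 1 ∨ ∀ dic ∈ ldic, (dic.lookup key).isSome = true
instance (ldic : List (List (String × String))) (key : String) (wert_in_front : Bool) : Decidable (Pre_uniq4ldic ldic key wert_in_front) := by unfold Pre_uniq4ldic; infer_instance

def pvWitness_uniq4ldic : (List (List (String × String))) × String × Bool :=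
  ([[("k", "1")], [("k", "1")], [("k", "2")]], "k", true)

def Spec_uniq4ldic (ldic : List (List (String × String))) (key : String) (wert_in_front : Bool) (out : List (List (String × String))) : Prop := out = uniq4ldic_alt ldic key wert_in_front
instance (ldic : List (List (String × String))) (key : String) (wert_in_front : Bool) (out : List (List (String × String))) : Decidable (Spec_uniq4ldic ldic key wert_in_front out) := by unfold Spec_uniq4ldic; infer_instance

-- ===== CLAIM (what is proved, stated in full; the proofs are below) =====
def Claim_equal_uniq4ldic : Prop := ∀ (ldic : List (List (String × String))) (key : String) (wert_in_front : Bool), Dom_uniq4ldic ldic key wert_in_front → Pre_uniq4ldic ldic key wert_in_front → Spec_uniq4ldic ldic key wert_in_front (uniq4ldic ldic key wert_in_front)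

-- ===== LEMMAS AND PROOFS =====

-- the key value A compares
def pvF (key : String) (dic : List (String × String)) : String := (dic.lookup key).getD ""

-- reference recursion: keep the last element of each run of equal consecutive key values
def pvG (key : String) : List (List (String × String)) → List (List (String × String))
  | [] => []
  | [a] => [a]
  | a :: b :: t => if pvF key a = pvF key b then pvG key (b :: t) else a :: pvG key (b :: t)

lemma pv_foldl_step (key : String) (l : List (List (String × String))) :
    ∀ (r : List (List (String × String))) (x : List (String × String)),
      List.foldl (pvStep key) (r ++ [x]) l = r ++ pvG key (x :: l) := by
  induction l with
  | nil => intro r x; simp [pvG]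
  | cons a t ih =>
      intro r x
      have hne : r ++ [x] ≠ [] := by simp
      rw [List.foldl_cons]
      by_cases h : pvF key a = pvF key x
      · have hs : pvStep key (r ++ [x]) a = r ++ [a] := by
          simp [pvStep, hne, PySem.List.pyGetD_neg_one_append_singleton, pvF] at h ⊢
          simp [h]
        rw [hs, ih r a, pvG, if_pos h.symm]
      · have hs : pvStep key (r ++ [x]) a = (r ++ [x]) ++ [a] := by
          simp only [pvStep, hne, PySem.List.pyGetD_neg_one_append_singleton]
          have h' : ¬ ((a.lookup key).getD "" = (x.lookup key).getD "") := h
          simp [h']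
        rw [hs, ih (r ++ [x]) a, pvG, if_neg (fun hh => h hh.symm)]
        simp

lemma pvA_core (key : String) (l : List (List (String × String))) :
    l.foldl (pvStep key) [] = pvG key l := by
  cases l with
  | nil => simp [pvG]
  | cons a t =>
      have := pv_foldl_step key t [] a
      simpa using this

lemma pvB_core (key : String) (l : List (List (String × String))) :
    (if l ≠ [] then
        (l.zip (PySem.List.slice l (some 1) none)).filterMap (pvKeep key) ++ [PySem.List.pyGetD l (-1) []]
      else (l.zip (PySem.List.slice l (some 1) none)).filterMap (pvKeep key)) = pvG key l := by
  induction l with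
  | nil => simp [pvG]
  | cons a t ih =>
      cases t with
      | nil =>
          simp [pvG, PySem.List.slice_from_one, PySem.List.pyGetD_neg_one [a] [] (by simp)]
      | cons b t' =>
          have hgl : PySem.List.pyGetD (a :: b :: t') (-1) ([] : List (String × String))
              = PySem.List.pyGetD (b :: t') (-1) ([] : List (String × String)) := by
            rw [PySem.List.pyGetD_neg_one (a :: b :: t') [] (by simp),
                PySem.List.pyGetD_neg_one (b :: t') [] (by simp)]
            simp [List.getLast_cons]
          simp only [PySem.List.slice_from_one, List.tail_cons, List.zip_cons_cons,
            List.filterMap_cons] at ih ⊢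
          by_cases h : pvF key a = pvF key b
          · have h' : pvKeep key (a, b) = none := by
              simp only [pvKeep]
              simp [pvF] at h
              simp [h]
            simp only [h']
            rw [pvG, if_pos h]
            simpa [hgl] using ih
          · have h' : pvKeep key (a, b) = some a := by
              simp only [pvKeep]
              simp [pvF] at h
              simp [h]
            simp only [h']
            rw [pvG, if_neg h]
            simp only [ne_eq, reduceCtorEq, not_false_eq_true, if_pos] at ih ⊢
            rw [hgl, List.cons_append, ih]

-- ===== VERDICT (by name: the statement is the Claim_ definition above) =====
theorem uniq4ldic_spec : Claim_equal_uniq4ldic := by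
  intro ldic key wert _ _
  unfold Spec_uniq4ldic uniq4ldic uniq4ldic_alt
  cases wert <;> simp only [Bool.false_eq_true, if_true, if_false]
  · rw [pvA_core key ldic, ← pvB_core key ldic]
  · rw [pvA_core key ldic.reverse, ← pvB_core key ldic.reverse]
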